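-- pv_equiv track=rewrite | github.com/highly0/LLM_Addition | src/make_data.py | decompose_number
-- ===== SOURCE A (Python) =====
-- NUMBER_TO_NAME = {
--     1: "units",
--     2: "tens",
--     3: "hundreds",
--     4: "thousands",
--     5: "ten thousands",
--     6: "hundred thousands",
--     7: "millions",
--     8: "ten millions",
--     9: "hundred millions",
--     10: "billions",
--     11: "ten billions",
--     12: "hundred billions",
--     13: "trillions",
--     14: "ten trillions",
--     15: "hundred trillions",
--     16: "quadrillions",
--     17: "ten quadrillions",
--     18: "hundred quadrillions",
--     19: "quintillions",
--     20: "ten quintillions",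
--     21: "hundred quintillions",
-- }
--
-- def extract_digit(number, k):
--     """given a number, return the kth digit"""
--     c = 0
--     result = 0
--     while c <= k:
--         result = number % 10
--         number = int(number / 10)
--         c += 1
--     return result
--
-- def decompose_number(number):
--     """given number, decompose it"""
--     number_len = len(str(number))
--     res = ""
--     for i in range(number_len):
--         curr_number = extract_digit(number, i)
--         sep = "" if i == number_len - 1 else ", "
--         res += f"{curr_number} {NUMBER_TO_NAME[i+1]}{sep}"
--     return res
-- ===== SOURCE B (Python) =====
-- # Single-pass digit sweep: keep cur and divide once per position instead of
-- # re-scanning with extract_digit; ', '.join replaces the sep bookkeeping.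
-- NUMBER_TO_NAME = {
--     1: "units",
--     2: "tens",
--     3: "hundreds",
--     4: "thousands",
--     5: "ten thousands",
--     6: "hundred thousands",
--     7: "millions",
--     8: "ten millions",
--     9: "hundred millions",
--     10: "billions",
--     11: "ten billions",
--     12: "hundred billions",
--     13: "trillions",
--     14: "ten trillions",
--     15: "hundred trillions",
--     16: "quadrillions",
--     17: "ten quadrillions",
--     18: "hundred quadrillions",
--     19: "quintillions",
--     20: "ten quintillions",
--     21: "hundred quintillions",
-- }
--
-- def decompose_number(number):
--     """given number, decompose it"""
--     parts = []
--     cur = number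
--     for i in range(len(str(number))):
--         parts.append(f"{cur % 10} {NUMBER_TO_NAME[i + 1]}")
--         cur = int(cur / 10)
--     return ", ".join(parts)
-- ===== Notes on version B (the rewrite author's own statement) =====
-- stated objective: faster
-- what changed: Replaces A's per-position extract_digit, which re-divides the number from scratch for every digit (quadratic in the digit count), by a single pass that keeps a running quotient cur, appends one part per position, and joins them with ', ' instead of A's manual last-separator bookkeeping.
import Mathlib
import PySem

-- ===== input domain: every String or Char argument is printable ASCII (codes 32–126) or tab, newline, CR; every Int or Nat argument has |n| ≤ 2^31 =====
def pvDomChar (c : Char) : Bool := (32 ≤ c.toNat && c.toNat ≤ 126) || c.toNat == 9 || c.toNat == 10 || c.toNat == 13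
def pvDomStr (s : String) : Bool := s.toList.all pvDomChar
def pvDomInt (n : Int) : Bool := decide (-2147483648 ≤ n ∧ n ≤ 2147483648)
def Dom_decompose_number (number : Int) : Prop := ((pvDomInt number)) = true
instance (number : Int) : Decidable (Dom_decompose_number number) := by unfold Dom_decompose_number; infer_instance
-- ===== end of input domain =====

-- B replaces A's per-position extract_digit rescans by one single-pass digit sweep
-- collecting parts joined with ", " (objective: faster by a single pass).

-- ===== PORT A =====
-- NUMBER_TO_NAME as an association list (Python dict, insertion order)
def pvNAMES : PySem.Dict Int String := PySem.Dict.ofList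
  [(1, "units"), (2, "tens"), (3, "hundreds"), (4, "thousands"), (5, "ten thousands"),
   (6, "hundred thousands"), (7, "millions"), (8, "ten millions"), (9, "hundred millions"),
   (10, "billions"), (11, "ten billions"), (12, "hundred billions"), (13, "trillions"),
   (14, "ten trillions"), (15, "hundred trillions"), (16, "quadrillions"),
   (17, "ten quadrillions"), (18, "hundred quadrillions"), (19, "quintillions"),
   (20, "ten quintillions"), (21, "hundred quintillions")]

-- NUMBER_TO_NAME[k]; the "" default is unreachable on Dom (at most 11 digit positions)
def pvName (k : Int) : List Char := (PySem.Dict.getD pvNAMES k "").toList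

-- the while-loop of extract_digit; fuel = remaining iterations ('while c <= k' runs k+1 times).
-- int(number / 10) is exact truncation toward zero on Dom (|n| ≤ 2^31 < 2^53): Int.tdiv
def extract_digit_go (number res : Int) : Nat → Int
  | 0 => res
  | f + 1 => extract_digit_go (Int.tdiv number 10) (PySem.Int.mod number 10) f

def extract_digit (number k : Int) : Int := extract_digit_go number 0 (k + 1).toNat

-- string pieces built as List Char (kernel-friendly), packed with String.ofList at the end
def decompose_number (number : Int) : String :=
  let number_len : Int := PySem.Str.len (PySem.Int.toStr number)
  String.ofList ((PySem.List.pyRange 0 number_len 1).foldl (fun res i =>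
    let curr_number := extract_digit number i
    let sep : List Char := if i = number_len - 1 then [] else [',', ' ']
    res ++ PySem.Int.toChars curr_number ++ [' '] ++ pvName (i + 1) ++ sep) [])

-- ===== PORT B =====
def decompose_number_alt (number : Int) : String :=
  let n : Int := PySem.Str.len (PySem.Int.toStr number)
  let st := (PySem.List.pyRange 0 n 1).foldl
    (fun (st : List (List Char) × Int) i =>
      (st.1 ++ [PySem.Int.toChars (PySem.Int.mod st.2 10) ++ [' '] ++ pvName (i + 1)],
       Int.tdiv st.2 10))  -- int(cur / 10): exact truncation on Dom
    ([], number)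
  String.ofList (PySem.Chars.join [',', ' '] st.1)

-- ===== PRECONDITION & SPEC =====
def Spec_decompose_number (number : Int) (out : String) : Prop := out = decompose_number_alt number
instance (number : Int) (out : String) : Decidable (Spec_decompose_number number out) := by unfold Spec_decompose_number; infer_instance

-- ===== CLAIM (what is proved, stated in full; the proofs are below) =====
def Claim_equal_decompose_number : Prop := ∀ (number : Int), Dom_decompose_number number → Spec_decompose_number number (decompose_number number)

-- ===== LEMMAS AND PROOFS =====

-- the digit step and the k-th part both ports compute
def pvStep (n : Int) : Int := Int.tdiv n 10
def pvItem (number : Int) (k : Nat) : List Char :=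
  PySem.Int.toChars (PySem.Int.mod (pvStep^[k] number) 10) ++ [' '] ++ pvName ((k : Int) + 1)

theorem extract_digit_go_irrel (f : Nat) : ∀ (n r r' : Int),
    extract_digit_go n r (f + 1) = extract_digit_go n r' (f + 1) := by
  induction f with
  | zero => intro n r r'; rfl
  | succ f ih => intro n r r'; exact ih (Int.tdiv n 10) (PySem.Int.mod n 10) (PySem.Int.mod n 10)

theorem extract_digit_go_spec (f : Nat) : ∀ (n : Int),
    extract_digit_go n 0 (f + 1) = PySem.Int.mod (pvStep^[f] n) 10 := by
  induction f with
  | zero => intro n; simp [extract_digit_go]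
  | succ f ih =>
    intro n
    calc extract_digit_go n 0 (f + 1 + 1)
        = extract_digit_go (Int.tdiv n 10) (PySem.Int.mod n 10) (f + 1) := rfl
      _ = extract_digit_go (Int.tdiv n 10) 0 (f + 1) := extract_digit_go_irrel f _ _ _
      _ = PySem.Int.mod (pvStep^[f] (pvStep n)) 10 := ih (pvStep n)
      _ = PySem.Int.mod (pvStep^[f + 1] n) 10 := by rw [Function.iterate_succ_apply]

theorem extract_digit_eq (number : Int) (k : Nat) :
    extract_digit number (k : Int) = PySem.Int.mod (pvStep^[k] number) 10 := by
  have h : ((k : Int) + 1).toNat = k + 1 := by omega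
  rw [extract_digit, h, extract_digit_go_spec]

-- B's fold invariant
theorem b_fold_spec (number : Int) (m : Nat) :
    (PySem.List.pyRange 0 (m : Int) 1).foldl
      (fun (st : List (List Char) × Int) i =>
        (st.1 ++ [PySem.Int.toChars (PySem.Int.mod st.2 10) ++ [' '] ++ pvName (i + 1)],
         Int.tdiv st.2 10)) ([], number)
    = ((List.range m).map (pvItem number), pvStep^[m] number) := by
  induction m with
  | zero => simp
  | succ m ih =>
    have hsplit : PySem.List.pyRange 0 ((m : Int) + 1) 1
        = PySem.List.pyRange 0 (m : Int) 1 ++ [(m : Int)] :=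
      PySem.List.pyRange_one_succ_right (by omega)
    push_cast
    rw [hsplit, List.foldl_append, ih, List.range_succ, List.map_append]
    simp [pvItem, pvStep, Function.iterate_succ_apply']

-- Nat.toDigits never returns the empty list (so len(str(number)) ≥ 1)
theorem toDigitsCore_cons_ne_nil (b : Nat) : ∀ (f n : Nat) (c : Char) (tl : List Char),
    Nat.toDigitsCore b f n (c :: tl) ≠ [] := by
  intro f
  induction f with
  | zero => intro n c tl; simp [Nat.toDigitsCore]
  | succ f ih =>
    intro n c tl
    simp only [Nat.toDigitsCore]
    split
    · simp
    · exact ih _ _ _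

theorem toChars_ne_nil (n : Int) : PySem.Int.toChars n ≠ [] := by
  simp only [PySem.Int.toChars]
  split
  · simp
  all_goals
    simp only [Nat.toDigits, Nat.toDigitsCore]
    split
    · simp
    · exact toDigitsCore_cons_ne_nil _ _ _ _ _

-- join over a snoc with a nonempty prefix
theorem join_snoc_cons (sep y : List Char) : ∀ (xs : List (List Char)) (x : List Char),
    PySem.Chars.join sep ((x :: xs) ++ [y]) = PySem.Chars.join sep (x :: xs) ++ sep ++ y := by
  intro xs
  induction xs with
  | nil =>
    intro x
    simp [PySem.Chars.join_cons_cons, PySem.Chars.join_singleton]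
  | cons z zs ih =>
    intro x
    have h1 : (x :: z :: zs) ++ [y] = x :: z :: (zs ++ [y]) := by simp
    have h2 : z :: (zs ++ [y]) = (z :: zs) ++ [y] := by simp
    rw [h1, PySem.Chars.join_cons_cons, h2, ih z, PySem.Chars.join_cons_cons]
    simp

theorem join_snoc (sep y : List Char) (l : List (List Char)) (hl : l ≠ []) :
    PySem.Chars.join sep (l ++ [y]) = PySem.Chars.join sep l ++ sep ++ y := by
  cases l with
  | nil => exact absurd rfl hl
  | cons x xs => exact join_snoc_cons sep y xs x

theorem join_range (sep : List Char) (g : Nat → List Char) : ∀ (t : Nat),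
    PySem.Chars.join sep ((List.range (t + 1)).map g)
      = (List.range t).flatMap (fun k => g k ++ sep) ++ g t := by
  intro t
  induction t with
  | zero => simp [PySem.Chars.join_singleton]
  | succ t ih =>
    rw [List.range_succ, List.map_append, List.map_cons, List.map_nil,
      join_snoc sep (g (t + 1)) (List.map g (List.range (t + 1))) (by simp),
      ih, List.range_succ]
    simp [List.append_assoc]

-- A's always-separator prefix as a flatMap over Nat indices
theorem a_flatMap_spec (number : Int) : ∀ (t : Nat),
    (PySem.List.pyRange 0 (t : Int) 1).flatMap (fun i =>
      PySem.Int.toChars (extract_digit number i) ++ [' '] ++ pvName (i + 1) ++ [',', ' '])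
    = (List.range t).flatMap (fun k => pvItem number k ++ [',', ' ']) := by
  intro t
  induction t with
  | zero => simp
  | succ t ih =>
    have hsplit : PySem.List.pyRange 0 ((t : Int) + 1) 1
        = PySem.List.pyRange 0 (t : Int) 1 ++ [(t : Int)] :=
      PySem.List.pyRange_one_succ_right (by omega)
    push_cast
    rw [hsplit, List.flatMap_append, ih, List.range_succ, List.flatMap_append]
    simp [pvItem, extract_digit_eq, List.append_assoc]

-- A's fold equals join of the items
theorem a_fold_spec (number : Int) (m : Nat) (hm : 0 < m) :
    (PySem.List.pyRange 0 (m : Int) 1).foldl (fun res i =>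
      res ++ PySem.Int.toChars (extract_digit number i) ++ [' '] ++ pvName (i + 1) ++
        (if i = (m : Int) - 1 then [] else [',', ' '])) []
    = PySem.Chars.join [',', ' '] ((List.range m).map (pvItem number)) := by
  obtain ⟨t, rfl⟩ : ∃ t, m = t + 1 := ⟨m - 1, by omega⟩
  push_cast
  have hsplit : PySem.List.pyRange 0 ((t : Int) + 1) 1
      = PySem.List.pyRange 0 (t : Int) 1 ++ [(t : Int)] :=
    PySem.List.pyRange_one_succ_right (by omega)
  rw [hsplit, List.foldl_append]
  have hcong : (PySem.List.pyRange 0 (t : Int) 1).foldl (fun res i =>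
      res ++ PySem.Int.toChars (extract_digit number i) ++ [' '] ++ pvName (i + 1) ++
        (if i = (t : Int) + 1 - 1 then [] else [',', ' '])) ([] : List Char)
      = (PySem.List.pyRange 0 (t : Int) 1).foldl (fun res i =>
      res ++ (PySem.Int.toChars (extract_digit number i) ++ [' '] ++ pvName (i + 1) ++ [',', ' '])) [] := by
    apply PySem.List.foldl_congr_mem
    intro acc x hx
    have hxlt : x < (t : Int) := (PySem.List.mem_pyRange_one.mp hx).2
    rw [if_neg (by omega)]
    simp [List.append_assoc]
  rw [hcong, PySem.List.foldl_append_eq_flatMap, a_flatMap_spec number t,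
    join_range [',', ' '] (pvItem number) t]
  simp only [List.foldl_cons, List.foldl_nil, List.nil_append]
  rw [if_pos (by omega)]
  simp [pvItem, extract_digit_eq, List.append_assoc]

-- ===== VERDICT (by name: the statement is the Claim_ definition above) =====
theorem decompose_number_spec : Claim_equal_decompose_number := by
  intro number _
  unfold Spec_decompose_number
  simp only [decompose_number, decompose_number_alt]
  have hlen : PySem.Str.len (PySem.Int.toStr number)
      = (((PySem.Int.toChars number).length : Nat) : Int) := by
    simp [PySem.Str.len_eq, ← PySem.Int.toList_toStr]
  have hm : 0 < (PySem.Int.toChars number).length :=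
    List.length_pos_iff.mpr (toChars_ne_nil number)
  rw [hlen, b_fold_spec number _, a_fold_spec number _ hm]
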